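-- pv_equiv track=rewrite | github.com/kostyabushuev/university-labs | Sam6_4.py | get_employee_order
-- ===== SOURCE A (Python) =====
-- def get_employee_order(value):
--     source_order, id = value
--     was_first_check = False
--
--     new_list = []
--     for x in list(source_order):
--         if x == id and was_first_check:
--             new_list.append(x)
--             break
--
--         if x == id: was_first_check = True
--
--         if was_first_check:
--             new_list.append(x)
--
--     return tuple(new_list)
-- ===== SOURCE B (Python) =====
-- def get_employee_order(value):
--     source_order, id = value
--     src = list(source_order)
--     try:
--         first = src.index(id)
--     except ValueError:
--         return ()
--     rest = src[first + 1:]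
--     try:
--         second = rest.index(id)
--         return tuple(src[first:first + second + 2])
--     except ValueError:
--         return tuple(src[first:])
-- ===== Notes on version B (the rewrite author's own statement) =====
-- stated objective: simpler
-- what changed: Replaces the flag-driven single accumulation pass (with break) by locating the first and second occurrence with list.index and returning a slice.
import Mathlib
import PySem

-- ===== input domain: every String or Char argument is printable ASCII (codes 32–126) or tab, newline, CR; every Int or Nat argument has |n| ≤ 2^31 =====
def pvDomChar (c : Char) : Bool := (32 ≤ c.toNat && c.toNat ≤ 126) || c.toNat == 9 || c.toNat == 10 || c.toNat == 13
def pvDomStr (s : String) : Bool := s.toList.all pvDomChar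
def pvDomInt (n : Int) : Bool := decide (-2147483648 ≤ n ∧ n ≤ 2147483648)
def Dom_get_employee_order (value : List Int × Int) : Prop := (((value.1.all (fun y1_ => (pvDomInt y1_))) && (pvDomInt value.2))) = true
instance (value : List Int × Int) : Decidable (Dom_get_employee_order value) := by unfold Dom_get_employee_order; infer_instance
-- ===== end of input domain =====

-- B replaces A's flag-driven accumulation loop (with break) by index-lookup of the
-- two occurrence boundaries followed by a slice; objective: simpler.

-- ===== PORT A =====
-- the for-loop of A: state = (was_first_check, new_list); `break` = return the accumulator
def getEmployeeLoopA (id : Int) : List Int → Bool → List Int → List Int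
  | [], _, acc => acc
  | x :: rest, was, acc =>
    if x == id && was then acc ++ [x]          -- append then break
    else
      let was' := if x == id then true else was
      if was' then getEmployeeLoopA id rest was' (acc ++ [x])
      else getEmployeeLoopA id rest was' acc

def get_employee_order (value : List Int × Int) : List Int :=
  getEmployeeLoopA value.2 value.1 false []

-- ===== PORT B =====
-- src.index(id) → PySem.List.index?; src[a:] / src[a:b] → PySem.List.slice
def get_employee_order_alt (value : List Int × Int) : List Int :=
  let src := value.1
  let id := value.2
  match PySem.List.index? src id with
  | none => []
  | some first =>
    let rest := PySem.List.slice src (some ((first : Int) + 1)) none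
    match PySem.List.index? rest id with
    | none => PySem.List.slice src (some (first : Int)) none
    | some second => PySem.List.slice src (some (first : Int)) (some ((first : Int) + (second : Int) + 2))

-- ===== PRECONDITION & SPEC =====
def Spec_get_employee_order (value : List Int × Int) (out : List Int) : Prop := out = get_employee_order_alt value
instance (value : List Int × Int) (out : List Int) : Decidable (Spec_get_employee_order value out) := by unfold Spec_get_employee_order; infer_instance

-- ===== CLAIM (what is proved, stated in full; the proofs are below) =====
def Claim_equal_get_employee_order : Prop := ∀ (value : List Int × Int), Dom_get_employee_order value → Spec_get_employee_order value (get_employee_order value)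

-- ===== LEMMAS AND PROOFS =====

-- skipping phase: before the first occurrence nothing is accumulated
theorem loopA_skip (id : Int) (pre ys : List Int) (h : id ∉ pre) :
    getEmployeeLoopA id (pre ++ ys) false [] = getEmployeeLoopA id ys false [] := by
  induction pre with
  | nil => rfl
  | cons x xs ih =>
    have hx : x ≠ id := by intro e; exact h (e ▸ List.mem_cons_self)
    have hx' : (x == id) = false := by simp [hx]
    simp only [List.cons_append, getEmployeeLoopA, hx']
    exact ih (fun hm => h (List.mem_cons_of_mem _ hm))

-- collecting phase: once the flag is set, elements are taken up to and including
-- the next occurrence, or to the end if there is none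
theorem loopA_collect (id : Int) (ys acc : List Int) :
    getEmployeeLoopA id ys true acc =
      match PySem.List.index? ys id with
      | none => acc ++ ys
      | some j => acc ++ ys.take (j + 1) := by
  induction ys generalizing acc with
  | nil => simp [getEmployeeLoopA, PySem.List.index?]
  | cons y ys ih =>
    by_cases hy : y = id
    · subst hy
      rw [PySem.List.index?_cons_self]
      simp [getEmployeeLoopA]
    · rw [PySem.List.index?_cons_of_ne ys hy]
      have hy' : (y == id) = false := by simp [hy]
      have hstep : getEmployeeLoopA id (y :: ys) true acc =
          getEmployeeLoopA id ys true (acc ++ [y]) := by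
        simp [getEmployeeLoopA, hy']
      rw [hstep, ih]
      cases h : PySem.List.index? ys id with
      | none => simp
      | some j => simp [List.take_succ_cons]

theorem get_employee_order_spec_aux (value : List Int × Int) :
    get_employee_order value = get_employee_order_alt value := by
  obtain ⟨src, id⟩ := value
  unfold get_employee_order get_employee_order_alt
  dsimp only
  cases hfirst : PySem.List.index? src id with
  | none =>
    have hnm : id ∉ src := (PySem.List.index?_eq_none_iff src id).mp hfirst
    have h0 : getEmployeeLoopA id (src ++ []) false [] = getEmployeeLoopA id [] false [] :=
      loopA_skip id src [] hnm
    rw [List.append_nil] at h0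
    rw [h0]
    rfl
  | some first =>
    obtain ⟨pre, suf, hsrc, hlen, hnp⟩ := (PySem.List.index?_eq_some_iff src id first).mp hfirst
    subst hsrc
    -- A side: skip pre, consume the id, then collect over suf
    have hA : getEmployeeLoopA id (pre ++ id :: suf) false [] =
        getEmployeeLoopA id suf true [id] := by
      rw [loopA_skip id pre _ hnp]
      simp [getEmployeeLoopA]
    -- rest = src[first+1:] = suf
    have hrest : PySem.List.slice (pre ++ id :: suf) (some ((first : Int) + 1)) none = suf := by
      have h1 : ((first : Int) + 1) = ((first + 1 : Nat) : Int) := by push_cast; ring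
      rw [h1, PySem.List.slice_from_natCast]
      subst hlen
      simp
    have hfrom : PySem.List.slice (pre ++ id :: suf) (some (first : Int)) none = id :: suf := by
      rw [PySem.List.slice_from_natCast]
      subst hlen
      simp
    rw [hA, loopA_collect]
    dsimp only
    rw [hrest]
    cases hsec : PySem.List.index? suf id with
    | none =>
      rw [hfrom]
      rfl
    | some j =>
      have hslice : PySem.List.slice (pre ++ id :: suf) (some (first : Int))
          (some ((first : Int) + (j : Int) + 2)) = id :: suf.take (j + 1) := by
        have hb : ((first : Int) + (j : Int) + 2) = ((first + j + 2 : Nat) : Int) := by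
          push_cast; ring
        rw [hb, PySem.List.slice_natCast]
        subst hlen
        have hdrop : (pre ++ id :: suf).drop pre.length = id :: suf := by simp
        rw [hdrop]
        have h2 : pre.length + j + 2 - pre.length = j + 2 := by omega
        rw [h2, List.take_succ_cons]
      dsimp only
      rw [hslice]
      rfl

-- ===== VERDICT (by name: the statement is the Claim_ definition above) =====
theorem get_employee_order_spec : Claim_equal_get_employee_order := by
  intro value _
  exact get_employee_order_spec_aux value
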